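-- pv_equiv track=rewrite | github.com/josefkarasek/elasticsearch-templates | scripts/generate_template.py | add_index_template_fields
-- ===== SOURCE A (Python) =====
-- def add_index_template_fields(rec):
--     doc_fields = ["description", "example", "path", "name"]
--     ret = {}
--     for field in rec:
--         if field in doc_fields: continue
--         if field == 'fields': continue
--         ret[field] = rec[field]
--     return ret
-- ===== SOURCE B (Python) =====
-- def add_index_template_fields(rec):
--     ret = dict(rec)
--     for k in ('description', 'example', 'path', 'name', 'fields'):
--         ret.pop(k, None)
--     return ret
-- ===== Notes on version B (the rewrite author's own statement) =====
-- stated objective: simpler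
-- what changed: B copies the whole dict once (a single C-level dict(rec) copy) and pops the five known excluded keys, instead of a Python-level loop over every key of rec with a membership test and per-key insertion.
import Mathlib
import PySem

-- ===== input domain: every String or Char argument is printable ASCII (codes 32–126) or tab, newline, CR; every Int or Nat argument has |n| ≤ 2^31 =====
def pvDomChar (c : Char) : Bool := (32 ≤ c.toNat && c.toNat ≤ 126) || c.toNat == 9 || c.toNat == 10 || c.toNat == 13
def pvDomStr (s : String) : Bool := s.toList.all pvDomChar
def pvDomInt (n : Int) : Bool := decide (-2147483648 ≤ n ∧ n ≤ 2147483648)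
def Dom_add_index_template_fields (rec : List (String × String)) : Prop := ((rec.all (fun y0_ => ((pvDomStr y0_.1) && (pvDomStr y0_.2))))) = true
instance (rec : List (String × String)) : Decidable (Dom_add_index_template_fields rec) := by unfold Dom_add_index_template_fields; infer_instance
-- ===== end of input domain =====

-- B copies the dict once and pops the five excluded keys; same return value, no scan of every key of rec.

-- ===== PORT A =====
-- for field in rec:  if field in doc_fields: continue;  if field == 'fields': continue;  ret[field] = rec[field]
def add_index_template_fields (rec : List (String × String)) : List (String × String) :=
  let doc_fields : List String := ["description", "example", "path", "name"]
  let ret : PySem.Dict String String :=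
    rec.foldl (fun ret p =>
      if doc_fields.contains p.1 then ret
      else if p.1 == "fields" then ret
      else ret.insert p.1 ((PySem.Dict.mk rec).getD p.1 "")) PySem.Dict.empty
  ret.items

-- ===== PORT B =====
-- ret = dict(rec);  for k in (…5 keys…): ret.pop(k, None);  return ret
def add_index_template_fields_alt (rec : List (String × String)) : List (String × String) :=
  ((["description", "example", "path", "name", "fields"] : List String).foldl
    (fun ret k => ret.erase k) (PySem.Dict.mk rec)).items

-- ===== PRECONDITION & SPEC =====
-- Pre_ is the dict representation invariant: rec stands for a Python dict, whose keys are
-- necessarily distinct; an association list with duplicate keys corresponds to no Python input.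
def Pre_add_index_template_fields (rec : List (String × String)) : Prop :=
  (rec.map Prod.fst).Nodup
instance (rec : List (String × String)) : Decidable (Pre_add_index_template_fields rec) := by
  unfold Pre_add_index_template_fields; infer_instance

def pvWitness_add_index_template_fields : (List (String × String)) :=
  [("name", "n"), ("type", "string"), ("fields", "f"), ("norms", "false")]

def Spec_add_index_template_fields (rec : List (String × String)) (out : List (String × String)) : Prop := out = add_index_template_fields_alt rec
instance (rec : List (String × String)) (out : List (String × String)) : Decidable (Spec_add_index_template_fields rec out) := by unfold Spec_add_index_template_fields; infer_instance

-- ===== CLAIM (what is proved, stated in full; the proofs are below) =====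
def Claim_equal_add_index_template_fields : Prop := ∀ (rec : List (String × String)), Dom_add_index_template_fields rec → Pre_add_index_template_fields rec → Spec_add_index_template_fields rec (add_index_template_fields rec)

-- ===== LEMMAS AND PROOFS =====

-- A's loop, started on any accumulator whose keys avoid the keys of l, appends exactly
-- the kept pairs of l (each inserted value is looked up in the full dict, hence the getD hypothesis).
theorem loopA (c1 c2 : String → Bool) (f : String → String)
    (l : List (String × String)) (acc : List (String × String))
    (hfresh : ∀ p ∈ l, (PySem.Dict.mk acc).contains p.1 = false)
    (hval : ∀ p ∈ l, f p.1 = p.2)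
    (hnd : (l.map Prod.fst).Nodup) :
    l.foldl (fun ret p =>
        if c1 p.1 then ret
        else if c2 p.1 then ret
        else ret.insert p.1 (f p.1)) (PySem.Dict.mk acc)
      = PySem.Dict.mk (acc ++ l.filter (fun p => !c1 p.1 && !c2 p.1)) := by
  induction l generalizing acc with
  | nil => simp
  | cons p l ih =>
    obtain ⟨k, v⟩ := p
    simp only [List.map_cons, List.nodup_cons] at hnd
    simp only [List.foldl_cons, List.filter_cons]
    by_cases h1 : c1 k
    · rw [if_pos h1]
      rw [ih acc (fun q hq => hfresh q (List.mem_cons_of_mem _ hq))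
        (fun q hq => hval q (List.mem_cons_of_mem _ hq)) hnd.2]
      simp [h1]
    · by_cases h2 : c2 k
      · rw [if_neg h1, if_pos h2]
        rw [ih acc (fun q hq => hfresh q (List.mem_cons_of_mem _ hq))
          (fun q hq => hval q (List.mem_cons_of_mem _ hq)) hnd.2]
        simp [h2]
      · have hins : (PySem.Dict.mk acc).insert k (f k) = PySem.Dict.mk (acc ++ [(k, v)]) := by
          have hc := hfresh (k, v) (List.mem_cons_self ..)
          have hv := hval (k, v) (List.mem_cons_self ..)
          simp only [PySem.Dict.insert, hc]
          simp [hv]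
        rw [if_neg h1, if_neg h2, hins]
        rw [ih (acc ++ [(k, v)])
          (fun q hq => by
            have hnk : q.1 ≠ k := by
              intro hkq
              exact hnd.1 (hkq ▸ (List.mem_map.mpr ⟨q, hq, rfl⟩))
            have := hfresh q (List.mem_cons_of_mem _ hq)
            simp only [PySem.Dict.contains, List.any_eq_false] at this ⊢
            intro r hr
            rcases List.mem_append.mp hr with h | h
            · exact this r h
            · simp only [List.mem_singleton] at h
              subst h
              simpa using Ne.symm hnk)
          (fun q hq => hval q (List.mem_cons_of_mem _ hq)) hnd.2]
        simp [h1, h2, List.append_assoc]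

-- B's five erases = one filter with the conjunction of the five disequalities.
theorem altB (rec : List (String × String)) :
    add_index_template_fields_alt rec
      = rec.filter (fun p =>
          !(["description", "example", "path", "name"] : List String).contains p.1
            && !(p.1 == "fields")) := by
  simp only [add_index_template_fields_alt, List.foldl_cons, List.foldl_nil, PySem.Dict.erase,
    PySem.Dict.items, List.filter_filter]
  apply List.filter_congr
  intro p _
  by_cases h1 : p.1 = "description" <;> by_cases h2 : p.1 = "example" <;>
    by_cases h3 : p.1 = "path" <;> by_cases h4 : p.1 = "name" <;>
    by_cases h5 : p.1 = "fields" <;> simp [h1, h2, h3, h4, h5]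

-- ===== VERDICT (by name: the statement is the Claim_ definition above) =====
theorem add_index_template_fields_spec : Claim_equal_add_index_template_fields := by
  intro rec _ hpre
  unfold Spec_add_index_template_fields
  unfold add_index_template_fields
  rw [altB]
  have := loopA (fun k => (["description", "example", "path", "name"] : List String).contains k)
    (fun k => k == "fields") (fun k => (PySem.Dict.mk rec).getD k "") rec []
    (by intro p _; simp [PySem.Dict.contains])
    (by
      intro p hp
      have : (p.1, p.2) ∈ (PySem.Dict.mk rec).items := by simpa using hp
      exact PySem.Dict.getD_of_mem_items _ this (by simpa [PySem.Dict.keys_mk] using hpre) "")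
    hpre
  simp only [PySem.Dict.empty] at this ⊢
  rw [this]
  simp
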